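-- pv_equiv track=rewrite | github.com/RickWinters/DevTools | helperfunctions.py | RemoveNumbersAtEnd
-- ===== SOURCE A (Python) =====
-- def RemoveNumbersAtEnd(name):
--     count = 0
--     test = 0
--     for c in name[::-1]:
--         try:
--             test += int(c)
--             count += 1
--         except:
--             break
--     if count > 0:
--         return name[:-count]
--     else:
--         return name
-- ===== SOURCE B (Python) =====
-- def RemoveNumbersAtEnd(name):
--     return name.rstrip('0123456789')
-- ===== Notes on version B (the rewrite author's own statement) =====
-- stated objective: idiomatic
-- what changed: Replaces the explicit reversed-character loop with try/except counting and a negative slice by a single str.rstrip call over the ten ASCII digit characters, stripping the trailing digit run directly.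
import Mathlib
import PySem

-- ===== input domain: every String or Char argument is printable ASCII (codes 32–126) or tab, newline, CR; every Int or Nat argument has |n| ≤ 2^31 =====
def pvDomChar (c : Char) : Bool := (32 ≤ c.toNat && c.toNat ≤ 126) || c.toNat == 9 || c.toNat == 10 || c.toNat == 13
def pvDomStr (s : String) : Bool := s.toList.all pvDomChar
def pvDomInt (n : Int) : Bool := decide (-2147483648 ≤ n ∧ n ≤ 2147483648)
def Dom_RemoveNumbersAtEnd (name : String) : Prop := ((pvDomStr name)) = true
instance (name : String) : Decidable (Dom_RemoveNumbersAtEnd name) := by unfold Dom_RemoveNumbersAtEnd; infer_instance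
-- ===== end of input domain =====

-- B replaces A's reversed-character loop (try/except int(c) counting + negative slice) by one idiomatic rstrip('0123456789') call; same behaviour, same cost.


-- ===== PORT A =====
-- the for-loop over name[::-1] with state (count, test); 'try: test += int(c); count += 1 except: break'
-- becomes: int(c) is PySem.Int.ofChars? [c]; some v continues with updated state, none breaks.
def pvLoopA : List Char → Int × Int → Int × Int
  | [], st => st
  | c :: cs, st =>
      match PySem.Int.ofChars? [c] with
      | some v => pvLoopA cs (st.1 + 1, st.2 + v)
      | none => st

def RemoveNumbersAtEnd (name : String) : String :=
  let cs := name.toList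
  let st := pvLoopA cs.reverse (0, 0)   -- name[::-1] is reverse (PySem.Str.slice?_none_none_neg_one)
  if st.1 > 0 then String.ofList (PySem.List.slice cs none (some (-st.1))) else name

-- ===== PORT B =====
-- hand port of name.rstrip('0123456789') (no rstrip-with-chars in the prelude): drop from the right
-- every char that is in the strip set — exact for every string.
def pvStripSet : List Char := ['0','1','2','3','4','5','6','7','8','9']

def RemoveNumbersAtEnd_alt (name : String) : String :=
  String.ofList ((name.toList.reverse.dropWhile (fun c => pvStripSet.contains c)).reverse)

-- ===== PRECONDITION & SPEC =====
def Spec_RemoveNumbersAtEnd (name : String) (out : String) : Prop := out = RemoveNumbersAtEnd_alt name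
instance (name : String) (out : String) : Decidable (Spec_RemoveNumbersAtEnd name out) := by unfold Spec_RemoveNumbersAtEnd; infer_instance

-- ===== CLAIM (what is proved, stated in full; the proofs are below) =====
def Claim_equal_RemoveNumbersAtEnd : Prop := ∀ (name : String), Dom_RemoveNumbersAtEnd name → Spec_RemoveNumbersAtEnd name (RemoveNumbersAtEnd name)

-- ===== LEMMAS AND PROOFS =====

-- inside the ASCII domain, int(c) succeeds exactly when c is an ASCII digit
lemma pv_ofChars_dom (c : Char) (hc : pvDomChar c = true) :
    (PySem.Int.ofChars? [c]).isSome = pvStripSet.contains c := by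
  have hlt : c.toNat < 127 := by
    simp [pvDomChar] at hc
    omega
  have key : ∀ n : Fin 127,
      (PySem.Int.ofChars? [Char.ofNat n.val]).isSome = pvStripSet.contains (Char.ofNat n.val) := by
    decide
  have := key ⟨c.toNat, hlt⟩
  simpa using this

-- the loop's count is the accumulator plus the length of the run of int-parsable chars
lemma pvLoopA_count (l : List Char) (a t : Int) :
    (pvLoopA l (a, t)).1 = a + ((l.takeWhile (fun c => (PySem.Int.ofChars? [c]).isSome)).length : Int) := by
  induction l generalizing a t with
  | nil => simp [pvLoopA]
  | cons c cs ih =>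
      cases h : PySem.Int.ofChars? [c] with
      | some v =>
          simp [pvLoopA, h, List.takeWhile, ih]
          ring
      | none =>
          simp [pvLoopA, h, List.takeWhile]

lemma pv_slice_neg (xs : List Char) (k : Nat) (hk : 0 < k) :
    PySem.List.slice xs none (some (-(k : Int))) = xs.take (xs.length - k) := by
  simp only [PySem.List.slice, PySem.List.clampIdx]
  by_cases h : (xs.length : Int) + (-(k:Int)) < 0
  · simp only [if_pos (by omega : -(k:Int) < 0), if_pos h]
    simp
    omega
  · simp only [if_pos (by omega : -(k:Int) < 0), if_neg h]
    congr 1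
    omega

lemma pv_takeWhile_congr (l : List Char) (p q : Char → Bool) (h : ∀ x ∈ l, p x = q x) :
    l.takeWhile p = l.takeWhile q := by
  induction l with
  | nil => rfl
  | cons a t ih =>
      simp only [List.takeWhile]
      rw [h a (by simp)]
      cases q a <;> simp [ih (fun x hx => h x (by simp [hx]))]

lemma pv_dropWhile_eq_drop (l : List Char) (q : Char → Bool) :
    l.dropWhile q = l.drop (l.takeWhile q).length := by
  induction l with
  | nil => rfl
  | cons a t ih =>
      simp only [List.dropWhile, List.takeWhile]
      cases q a <;> simp [ih]

-- ===== VERDICT (by name: the statement is the Claim_ definition above) =====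
theorem RemoveNumbersAtEnd_spec : Claim_equal_RemoveNumbersAtEnd := by
  intro name hdom
  unfold Spec_RemoveNumbersAtEnd RemoveNumbersAtEnd RemoveNumbersAtEnd_alt
  have hdomc : ∀ x ∈ name.toList.reverse, pvDomChar x = true := by
    intro x hx
    have : x ∈ name.toList := by simpa using hx
    exact List.all_eq_true.mp hdom x this
  have hpq : name.toList.reverse.takeWhile (fun c => (PySem.Int.ofChars? [c]).isSome)
      = name.toList.reverse.takeWhile (fun c => pvStripSet.contains c) :=
    pv_takeWhile_congr _ _ _ (fun x hx => pv_ofChars_dom x (hdomc x hx))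
  have hcount := pvLoopA_count name.toList.reverse 0 0
  rw [hpq] at hcount
  set k := (name.toList.reverse.takeWhile (fun c => pvStripSet.contains c)).length with hk
  rw [pv_dropWhile_eq_drop]
  simp only [hcount, zero_add]
  rcases Nat.eq_zero_or_pos k with h0 | hpos
  · rw [if_neg (by omega), ← hk, h0]
    simp
  · rw [if_pos (by exact_mod_cast hpos), pv_slice_neg _ k hpos]
    rw [← hk, List.drop_reverse]
    simp [hk]
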